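/- GENERATED by tools/from_farm_form.py from farm/worked/pow_int/Proof.lean (a worked proof of the farm's unit `pow_int`,
   accepted by the verdict) — do not edit. -/
import ProgX.Base.Spec.Units.pow_int

open X86 X86.User Asan ProgX.Base

set_option maxRecDepth 4000
set_option maxHeartbeats 4000000

namespace ProgX.Base.Spec.Proved.pow_int
open ProgX.Base.Spec.pow_int (Statement)

/-- The loop's measure decreases: the 32-bit value of `edi` after `shr edi, 1` (0x101dae, libm.c:152 `n = n >> 1`) is smaller
than before, because the loop test (0x101db2, libm.c:147 `n != 0`) found it non-zero. -/
theorem shr_measure_w (n : Word) (hne : ¬(Word.part Width.w32 n).toNat = 0) :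
    (Word.ofBV (Word.part Width.w32 n >>> 1)).toNat % 2 ^ 32 < n.toNat % 2 ^ 32 := by
  rw [ProgX.Base.toNat_part32] at hne
  rw [ProgX.Base.toNat_ofBV32, BitVec.toNat_ushiftRight, ProgX.Base.toNat_part32, Nat.shiftRight_eq_div_pow]
  omega

end ProgX.Base.Spec.Proved.pow_int

/-- `pow_int(xmm0 = x, edi = n)` satisfies its contract: one constant load, then the only loop of libm, counted by the 32-bit
value of `edi` (it halves at every round); nothing is stored, so the memory is the entry's at every point. -/
theorem ProgX.Base.Spec.Proved.pow_int_ok : ProgX.Base.Spec.pow_int.Statement := by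
  intro Lay hLay μ hμ u₀ hcode others frames u ret he hpre
  v_entry he
  have hsp := hpre.rsp
  -- 0x101da0 (libm.c:146 `double r = 1.0;`) and the jump to the loop head
  u_walk hcode [hμ.vendor] until [ProgX.Base.L.pow_int.loop1] span [ProgX.Base.L.textLo, ProgX.Base.L.textHi] side (v_side)
  -- the loop head 0x101db0 (libm.c:147 `while (n != 0) {`): `edi` is generalised, the flags and MXCSR are replaced by what the
  -- convention needs of them (DF = 0, the six exception masks set); the memory stays the entry's (`w_mem`)
  obtain ⟨n, w_rdi⟩ : ∃ n : Word, s_101da8.reg .rdi = n := ⟨_, rfl⟩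
  have hdf : s_101da8.flags .df = false := by
    rw [w_flags]
    exact he_df
  have hmx : s_101da8.mxcsr &&& 8064 = 8064 := by
    rw [w_mxcsr]
    exact he_mx
  replace w_kept := w_kept.mono_all (S' := [.rdi]) (by rfl)
  clear w_flags w_mxcsr
  u_loop [n] (fun v => (v.reg .rdi).toNat % 2 ^ 32)
  u_walk hcode [hμ.vendor] until [ProgX.Base.L.pow_int.loop1] span [ProgX.Base.L.textLo, ProgX.Base.L.textHi] side (v_side)
  · -- the exit (0x101dc0, libm.c:155), walked to the `ret`: the contract's `Returned`
    refine ReachVia.done (Or.inl ?_)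
    v_returned
    -- the post: nothing was stored
    show ShadowUntouched u.mem s_101dc4.mem
    v_untouched
  · -- the back edge, `n & 1 = 0` (0x101db8 taken): `x = x * x; n = n >> 1`
    u_loop_back [Word.ofBV (Word.part .w32 n >>> 1)]
    · -- the direction flag: `shr` wrote status flags only
      rw [w_flags]
      simp only [X86.User.df_setStatus]
      exact hdf
    · -- the MXCSR masks: kept by `mulsd`
      rw [w_mxcsr]
      exact hmx_101daa
    · -- the measure
      rw [w_rdi]
      exact ProgX.Base.Spec.Proved.pow_int.shr_measure_w n hbr_101db2
  · -- the back edge, `n & 1 = 1`: `r = r * x; x = x * x; n = n >> 1`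
    u_loop_back [Word.ofBV (Word.part .w32 n >>> 1)]
    · rw [w_flags]
      simp only [X86.User.df_setStatus]
      exact hdf
    · rw [w_mxcsr]
      exact hmx_101daa
    · rw [w_rdi]
      exact ProgX.Base.Spec.Proved.pow_int.shr_measure_w n hbr_101db2
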